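-- pv_equiv track=rewrite | github.com/whcswd/kernel-tcp | liebes/tcp_approach/metric_manager.py | manhattan_string_distance
-- ===== SOURCE A (Python) =====
-- def manhattan_string_distance(s1, s2):
--     len_diff = abs(len(s1) - len(s2))
--     if len(s1) < len(s2):
--         s1 += '\0' * len_diff
--     elif len(s1) > len(s2):
--         s2 += '\0' * len_diff
--     point1 = [ord(char) for char in s1]
--     point2 = [ord(char) for char in s2]
--
--     distance = 0
--     for i in range(len(point1)):
--         distance += abs(point1[i] - point2[i])
--     return distance
-- ===== SOURCE B (Python) =====
-- def manhattan_string_distance(s1, s2):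
--     # |a-b| = a + b - 2*min(a,b); padding chars are NUL (code 0), whose min
--     # contribution vanishes, so the distance is the total of all char codes
--     # minus twice the sum of pairwise minima of the overlapping part.
--     total = sum(map(ord, s1)) + sum(map(ord, s2))
--     shared = 2 * sum(min(ord(a), ord(b)) for a, b in zip(s1, s2))
--     return total - shared
-- ===== Notes on version B (the rewrite author's own statement) =====
-- stated objective: alternative
-- what changed: Replaces A's pad-with-NUL-then-abs-difference index loop by the arithmetic identity |a-b| = a+b-2*min(a,b): B sums all character codes of both strings and subtracts twice the sum of pairwise minima over the overlap, with no padding, no abs, and no index arithmetic.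
import Mathlib
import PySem

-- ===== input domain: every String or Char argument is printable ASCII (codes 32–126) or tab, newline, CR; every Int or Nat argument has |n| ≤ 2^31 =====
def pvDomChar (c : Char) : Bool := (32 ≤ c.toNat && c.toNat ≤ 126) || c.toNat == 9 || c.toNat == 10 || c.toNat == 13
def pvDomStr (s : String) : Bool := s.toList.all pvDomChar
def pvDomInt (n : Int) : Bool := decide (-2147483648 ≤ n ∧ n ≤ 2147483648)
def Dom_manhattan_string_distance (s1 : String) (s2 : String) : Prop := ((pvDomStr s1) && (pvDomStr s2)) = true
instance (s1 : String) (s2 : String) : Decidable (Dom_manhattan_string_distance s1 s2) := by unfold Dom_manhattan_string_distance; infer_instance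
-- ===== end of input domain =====

-- B replaces A's NUL-padding and abs-difference index loop by the identity
-- |a-b| = a+b-2*min(a,b): total code sum minus twice the pairwise-minimum sum (alternative; no argument is mutated).

-- ===== PORT A =====
def manhattan_string_distance (s1 : String) (s2 : String) : Int :=
  let l1 := s1.toList
  let l2 := s2.toList
  let len_diff : Int := |(l1.length : Int) - (l2.length : Int)|
  -- Python rebinds s1/s2 to the NUL-padded strings; modelled as the lists t1/t2
  let t1 := if l1.length < l2.length then l1 ++ List.replicate len_diff.toNat '\x00' else l1
  let t2 := if l1.length > l2.length then l2 ++ List.replicate len_diff.toNat '\x00' else l2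
  let point1 := t1.map (fun c => (c.toNat : Int))
  let point2 := t2.map (fun c => (c.toNat : Int))
  (PySem.List.pyRange 0 (point1.length : Int) 1).foldl
    (fun d i => d + |PySem.List.pyGetD point1 i 0 - PySem.List.pyGetD point2 i 0|) 0

-- ===== PORT B =====
def manhattan_string_distance_alt (s1 : String) (s2 : String) : Int :=
  let l1 := s1.toList
  let l2 := s2.toList
  let total := (l1.map (fun c => (c.toNat : Int))).sum + (l2.map (fun c => (c.toNat : Int))).sum
  let shared := 2 * ((l1.zip l2).map (fun p => min ((p.1.toNat : Int)) ((p.2.toNat : Int)))).sum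
  total - shared

-- ===== PRECONDITION & SPEC =====
def Spec_manhattan_string_distance (s1 : String) (s2 : String) (out : Int) : Prop := out = manhattan_string_distance_alt s1 s2
instance (s1 : String) (s2 : String) (out : Int) : Decidable (Spec_manhattan_string_distance s1 s2 out) := by unfold Spec_manhattan_string_distance; infer_instance

-- ===== CLAIM (what is proved, stated in full; the proofs are below) =====
def Claim_equal_manhattan_string_distance : Prop := ∀ (s1 : String) (s2 : String), Dom_manhattan_string_distance s1 s2 → Spec_manhattan_string_distance s1 s2 (manhattan_string_distance s1 s2)

-- ===== LEMMAS AND PROOFS =====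

-- A's index loop over two equal-length Int lists is the sum over their zip.
theorem map_pyRange_pair (xs ys : List Int) (h : xs.length = ys.length) :
    (PySem.List.pyRange 0 (xs.length : Int) 1).map
      (fun i => |PySem.List.pyGetD xs i 0 - PySem.List.pyGetD ys i 0|)
    = (xs.zip ys).map (fun p => |p.1 - p.2|) := by
  rw [PySem.List.pyRange_zero_natCast, List.map_map]
  apply List.ext_getElem
  · simp [h]
  · intro k h1 h2
    simp only [List.length_map, List.length_range] at h1
    simp only [List.getElem_map, List.getElem_range, List.getElem_zip, Function.comp_apply]
    rw [PySem.List.pyGetD_eq_getElem xs (i := (k : Int)) 0 (by omega) (by exact_mod_cast h1),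
        PySem.List.pyGetD_eq_getElem ys (i := (k : Int)) 0 (by omega) (by omega)]
    simp

theorem abs_eq_add_sub_two_min (a b : Int) : |a - b| = a + b - 2 * min a b := by
  rcases le_total a b with h | h
  · rw [min_eq_left h, abs_sub_comm, abs_of_nonneg (by omega)]; ring
  · rw [min_eq_right h, abs_of_nonneg (by omega)]; ring

-- the NUL-padding pairs contribute exactly the longer string's tail codes
theorem zip_replicate_zero_sum (ys : List Char) :
    (List.map (fun p : Int × Int => |p.1 - p.2|)
      (((List.replicate ys.length '\x00').map (fun c => (c.toNat : Int))).zip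
        (ys.map (fun c => (c.toNat : Int))))).sum
    = (ys.map (fun c => (c.toNat : Int))).sum := by
  induction ys with
  | nil => rfl
  | cons y ys ih =>
    simp only [List.length_cons, List.replicate_succ, List.map_cons, List.zip_cons_cons,
      List.sum_cons, ih]
    norm_num

-- padding the shorter list and summing |·-·| ≡ total code sum minus twice the min sum
theorem pad_sum : ∀ (l1 l2 : List Char), l1.length ≤ l2.length →
    (List.map (fun p : Int × Int => |p.1 - p.2|)
      (((l1 ++ List.replicate (l2.length - l1.length) '\x00').map (fun c => (c.toNat : Int))).zip
        (l2.map (fun c => (c.toNat : Int))))).sum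
    = (l1.map (fun c => (c.toNat : Int))).sum + (l2.map (fun c => (c.toNat : Int))).sum
      - 2 * ((l1.zip l2).map (fun p => min ((p.1.toNat : Int)) ((p.2.toNat : Int)))).sum := by
  intro l1
  induction l1 with
  | nil =>
    intro l2 _
    simpa using zip_replicate_zero_sum l2
  | cons a t ih =>
    intro l2 hle
    cases l2 with
    | nil => simp at hle
    | cons b t2 =>
      simp only [List.length_cons, List.cons_append, List.map_cons, List.zip_cons_cons,
        List.sum_cons, Nat.succ_sub_succ]
      rw [ih t2 (by simpa using hle), abs_eq_add_sub_two_min]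
      ring

theorem zip_abs_swap' (xs ys : List Int) :
    ((xs.zip ys).map (fun p : Int × Int => |p.1 - p.2|))
    = ((ys.zip xs).map (fun p : Int × Int => |p.1 - p.2|)) := by
  rw [← List.zip_swap xs ys, List.map_map]
  exact List.map_congr_left (fun p _ => abs_sub_comm _ _)

theorem zip_min_swap (xs ys : List Char) :
    ((xs.zip ys).map (fun p => min ((p.1.toNat : Int)) ((p.2.toNat : Int))))
    = ((ys.zip xs).map (fun p => min ((p.1.toNat : Int)) ((p.2.toNat : Int)))) := by
  rw [← List.zip_swap xs ys, List.map_map]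
  exact List.map_congr_left (fun p _ => min_comm _ _)

theorem abs_toNat_sub (a b : Nat) (h : a ≤ b) : (|(a : Int) - (b : Int)|).toNat = b - a := by
  rw [abs_sub_comm, abs_of_nonneg (by omega)]; omega

-- ===== VERDICT (by name: the statement is the Claim_ definition above) =====
theorem manhattan_string_distance_spec : Claim_equal_manhattan_string_distance := by
  intro s1 s2 _
  unfold Spec_manhattan_string_distance manhattan_string_distance manhattan_string_distance_alt
  simp only []
  set l1 := s1.toList with hl1
  set l2 := s2.toList with hl2
  rcases lt_trichotomy l1.length l2.length with hlt | heq | hgt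
  · rw [if_pos hlt, if_neg (by omega), abs_toNat_sub _ _ (le_of_lt hlt)]
    rw [PySem.List.foldl_add, zero_add]
    have hlen : ((l1 ++ List.replicate (l2.length - l1.length) '\x00').map
        (fun c => (c.toNat : Int))).length = (l2.map (fun c => (c.toNat : Int))).length := by
      simp; omega
    rw [map_pyRange_pair _ _ hlen, pad_sum l1 l2 (le_of_lt hlt)]
  · rw [if_neg (by omega), if_neg (by omega)]
    rw [PySem.List.foldl_add, zero_add]
    have hlen : (l1.map (fun c => (c.toNat : Int))).length
        = (l2.map (fun c => (c.toNat : Int))).length := by simp [heq]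
    rw [map_pyRange_pair _ _ hlen]
    have := pad_sum l1 l2 (le_of_eq heq)
    rw [heq, Nat.sub_self, List.replicate_zero, List.append_nil] at this
    rw [this]
  · rw [if_neg (by omega), if_pos hgt, abs_sub_comm, abs_toNat_sub _ _ (le_of_lt hgt)]
    rw [PySem.List.foldl_add, zero_add]
    have hlen : (l1.map (fun c => (c.toNat : Int))).length
        = ((l2 ++ List.replicate (l1.length - l2.length) '\x00').map
            (fun c => (c.toNat : Int))).length := by simp; omega
    rw [map_pyRange_pair _ _ hlen, zip_abs_swap', pad_sum l2 l1 (le_of_lt hgt),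
        zip_min_swap l1 l2]
    ring
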